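-- pv_equiv track=rewrite | github.com/zachgampel/Fiber_Classifier | Fiber_Classifier/Utils.py | straightenArray
-- ===== SOURCE A (Python) =====
-- def straightenArray(name_list):
--     length = 0
--     for row in name_list:
--         if len(row) > length:
--             length = len(row)
--
--     straight_array = []
--     for row in name_list:
--         temp = []
--         for i in range(0, length):
--             temp.append([])
--         straight_array.append(temp)
--
--     i = 0
--     for row in name_list:
--         j = 0
--         for element in row:
--             straight_array[i][j] = element
--             j += 1
--         i += 1
--
--     return straight_array
-- ===== SOURCE B (Python) =====
-- def straightenArray(name_list):
--     out = []
--     width = 0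
--     for row in name_list:
--         n = len(row)
--         if n > width:
--             out = [r + [[] for _ in range(n - width)] for r in out]
--             width = n
--         out.append(list(row) + [[] for _ in range(width - n)])
--     return out
-- ===== Notes on version B (the rewrite author's own statement) =====
-- stated objective: alternative
-- what changed: Single online pass that maintains the padded result and the current width, retroactively padding the already-built rows whenever a longer row arrives, instead of A's three stages (scan for the max, allocate a full grid of empty lists, overwrite cells in place).
import Mathlib
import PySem

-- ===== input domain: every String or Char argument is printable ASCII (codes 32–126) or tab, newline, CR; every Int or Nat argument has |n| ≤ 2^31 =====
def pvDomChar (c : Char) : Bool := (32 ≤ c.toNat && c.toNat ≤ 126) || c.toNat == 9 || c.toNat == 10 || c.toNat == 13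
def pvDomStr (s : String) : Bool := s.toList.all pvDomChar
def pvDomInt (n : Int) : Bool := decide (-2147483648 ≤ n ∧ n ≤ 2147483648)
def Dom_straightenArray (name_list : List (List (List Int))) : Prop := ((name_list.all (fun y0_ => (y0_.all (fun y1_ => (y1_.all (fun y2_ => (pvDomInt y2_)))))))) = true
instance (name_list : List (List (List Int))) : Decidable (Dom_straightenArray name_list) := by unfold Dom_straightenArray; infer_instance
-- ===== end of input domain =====

-- B makes one online pass keeping the result padded to the running max width (retro-padding
-- earlier rows when a longer row arrives) instead of A's scan-allocate-overwrite; objective: alternative.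

-- ===== PORT A =====
-- loop counters i, j are nonnegative Python ints used only as list indices; ported as Nat
def straightenArray (name_list : List (List (List Int))) : List (List (List Int)) :=
  let length : Nat := name_list.foldl (fun l row => if row.length > l then row.length else l) 0
  let straight_array : List (List (List Int)) :=
    name_list.foldl (fun acc _row =>
      acc ++ [(List.range length).foldl (fun temp _ => temp ++ [([] : List Int)]) []]) []
  (name_list.foldl (fun (s : List (List (List Int)) × Nat) row =>
      ((row.foldl (fun (t : List (List (List Int)) × Nat) element =>
          (t.1.set s.2 ((t.1.getD s.2 []).set t.2 element), t.2 + 1)) (s.1, 0)).1,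
       s.2 + 1)) (straight_array, 0)).1

-- ===== PORT B =====
-- fold state = (out, width); 'n > width' branch retro-pads out, else-branch pads the new row
def straightenArray_alt (name_list : List (List (List Int))) : List (List (List Int)) :=
  (name_list.foldl (fun (s : List (List (List Int)) × Nat) row =>
      if row.length > s.2 then
        (s.1.map (fun r => r ++ (List.range (row.length - s.2)).map (fun _ => ([] : List Int)))
           ++ [row ++ (List.range (row.length - row.length)).map (fun _ => ([] : List Int))],
         row.length)
      else
        (s.1 ++ [row ++ (List.range (s.2 - row.length)).map (fun _ => ([] : List Int))], s.2))
    ([], 0)).1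

-- ===== PRECONDITION & SPEC =====
def Spec_straightenArray (name_list : List (List (List Int))) (out : List (List (List Int))) : Prop := out = straightenArray_alt name_list
instance (name_list : List (List (List Int))) (out : List (List (List Int))) : Decidable (Spec_straightenArray name_list out) := by unfold Spec_straightenArray; infer_instance

-- ===== CLAIM (what is proved, stated in full; the proofs are below) =====
def Claim_equal_straightenArray : Prop := ∀ (name_list : List (List (List Int))), Dom_straightenArray name_list → Spec_straightenArray name_list (straightenArray name_list)

-- ===== LEMMAS AND PROOFS =====

theorem pv_range_map (k : Nat) :
    (List.range k).map (fun _ => ([] : List Int)) = List.replicate k ([] : List Int) := by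
  simp [List.map_const']

-- A's max-length loop equals the foldr max
theorem pv_len_eq (xs : List (List (List Int))) (a : Nat) :
    xs.foldl (fun l row => if row.length > l then row.length else l) a
      = max a ((xs.map List.length).foldr max 0) := by
  induction xs generalizing a with
  | nil => simp
  | cons x xs ih =>
    simp only [List.foldl_cons, List.map_cons, List.foldr_cons, ih]
    have : (if x.length > a then x.length else a) = max a x.length := by
      rcases Nat.lt_or_ge a x.length with h | h
      · simp [h, Nat.max_eq_right (Nat.le_of_lt h)]
      · simp [Nat.not_lt.mpr h, Nat.max_eq_left h]
    rw [this, Nat.max_assoc]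

-- the append-one-by-one fold builds a replicate
theorem pv_fold_append {α β : Type} (xs : List β) (init : List α) (c : α) :
    xs.foldl (fun t _ => t ++ [c]) init = init ++ List.replicate xs.length c := by
  induction xs generalizing init with
  | nil => simp
  | cons x xs ih => simp [ih, List.replicate_succ]

-- each row ≤ the computed max
theorem pv_le_max (xs : List (List (List Int))) (row : List (List Int)) (h : row ∈ xs) :
    row.length ≤ (xs.map List.length).foldr max 0 := by
  induction xs with
  | nil => cases h
  | cons x xs ih =>
    rcases List.mem_cons.mp h with rfl | h'
    · simp
    · have := ih h'
      simp only [List.map_cons, List.foldr_cons]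
      omega

-- set at an offset past a prefix
theorem pv_set_past {α : Type} (pre : List α) (c : α) (r : List α) (e : α) :
    (pre ++ c :: r).set pre.length e = pre ++ e :: r := by
  induction pre with
  | nil => rfl
  | cons p pre ih => simp [ih]

-- getD at an offset past a prefix
theorem pv_getD_past {α : Type} (pre : List α) (c : α) (r : List α) (d : α) :
    (pre ++ c :: r).getD pre.length d = c := by
  induction pre with
  | nil => rfl
  | cons p pre ih => exact ih

theorem pv_set_getD {α : Type} (l : List α) (i : Nat) (d : α) (h : i < l.length) :
    l.set i (l.getD i d) = l := by
  rw [List.getD_eq_getElem l d h]; exact List.set_getElem_self ..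

theorem pv_getD_set {α : Type} (l : List α) (i : Nat) (a d : α) (h : i < l.length) :
    (l.set i a).getD i d = a := by
  rw [List.getD_eq_getElem _ d (by simpa using h)]; simp

-- sequential writes into a row, abstractly
def pvWrite (r : List (List Int)) (j : Nat) (row : List (List Int)) : List (List Int) :=
  match row with
  | [] => r
  | e :: es => pvWrite (r.set j e) (j + 1) es

theorem pv_write_eq (row pre r : List (List Int)) (h : row.length ≤ r.length) :
    pvWrite (pre ++ r) pre.length row = pre ++ row ++ r.drop row.length := by
  induction row generalizing pre r with
  | nil => simp [pvWrite]
  | cons e es ih =>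
    cases r with
    | nil => simp at h
    | cons c r' =>
      have h' : es.length ≤ r'.length := by simpa using h
      simp only [pvWrite, pv_set_past]
      have hcast : pre ++ e :: r' = (pre ++ [e]) ++ r' := by simp
      rw [hcast]
      have hlen : pre.length + 1 = (pre ++ [e]).length := by simp
      rw [hlen, ih (pre ++ [e]) r' h']
      simp

-- the inner fold is a single set with pvWrite
theorem pv_inner_fold (row : List (List Int)) (g : List (List (List Int))) (i j : Nat)
    (hi : i < g.length) :
    (row.foldl (fun (t : List (List (List Int)) × Nat) element =>
        (t.1.set i ((t.1.getD i []).set t.2 element), t.2 + 1)) (g, j)).1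
      = g.set i (pvWrite (g.getD i []) j row) := by
  induction row generalizing g j with
  | nil => simp only [pvWrite]; exact (pv_set_getD g i [] hi).symm
  | cons e es ih =>
    simp only [List.foldl_cons]
    rw [ih _ (j + 1) (by simpa using hi)]
    rw [List.set_set, pv_getD_set g i _ [] hi]
    rfl

-- the outer fill loop over a grid of identical rows
theorem pv_outer_fold (rows : List (List (List Int))) (pre : List (List (List Int)))
    (R : List (List Int)) :
    (rows.foldl (fun (s : List (List (List Int)) × Nat) row =>
        ((row.foldl (fun (t : List (List (List Int)) × Nat) element =>
            (t.1.set s.2 ((t.1.getD s.2 []).set t.2 element), t.2 + 1)) (s.1, 0)).1,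
         s.2 + 1)) (pre ++ List.replicate rows.length R, pre.length)).1
      = pre ++ rows.map (fun row => pvWrite R 0 row) := by
  induction rows generalizing pre with
  | nil => simp
  | cons row rows ih =>
    rw [List.foldl_cons]
    have hstate :
        ((row.foldl (fun (t : List (List (List Int)) × Nat) element =>
            (t.1.set pre.length ((t.1.getD pre.length []).set t.2 element), t.2 + 1))
            (pre ++ List.replicate (row :: rows).length R, 0)).1,
          pre.length + 1)
        = ((pre ++ [pvWrite R 0 row]) ++ List.replicate rows.length R,
           (pre ++ [pvWrite R 0 row]).length) := by
      rw [pv_inner_fold row _ pre.length 0 (by simp)]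
      simp only [List.length_cons, List.replicate_succ, pv_getD_past, pv_set_past]
      simp
    rw [hstate, ih (pre ++ [pvWrite R 0 row])]
    simp

-- writing a row into a blank row of length L
theorem pv_write_blank (row : List (List Int)) (L : Nat) (h : row.length ≤ L) :
    pvWrite (List.replicate L ([] : List Int)) 0 row
      = row ++ List.replicate (L - row.length) ([] : List Int) := by
  have hsplit : List.replicate L ([] : List Int)
      = List.replicate row.length ([] : List Int) ++ List.replicate (L - row.length) [] := by
    rw [List.replicate_append_replicate, Nat.add_sub_cancel' h]
  have hmain := pv_write_eq row [] (List.replicate L ([] : List Int)) (by simpa using h)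
  simp only [List.nil_append, List.length_nil] at hmain
  rw [hmain, hsplit]
  simp

-- B's online fold, with the running invariant: all accumulated rows have length w
theorem pv_alt_inv (xs : List (List (List Int))) (out : List (List (List Int))) (w : Nat)
    (h : ∀ r ∈ out, r.length = w) :
    (xs.foldl (fun (s : List (List (List Int)) × Nat) row =>
        if row.length > s.2 then
          (s.1.map (fun r => r ++ List.replicate (row.length - s.2) ([] : List Int))
             ++ [row ++ List.replicate (row.length - row.length) ([] : List Int)],
           row.length)
        else
          (s.1 ++ [row ++ List.replicate (s.2 - row.length) ([] : List Int)], s.2))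
      (out, w)).1
      = out.map (fun r => r ++ List.replicate (max w ((xs.map List.length).foldr max 0) - w) [])
        ++ xs.map (fun row =>
            row ++ List.replicate (max w ((xs.map List.length).foldr max 0) - row.length) []) := by
  induction xs generalizing out w with
  | nil =>
    simp only [List.foldl_nil, List.map_nil, List.foldr_nil, List.append_nil]
    have : max w 0 = w := Nat.max_eq_left (Nat.zero_le w)
    rw [this]
    simp
  | cons row xs ih =>
    simp only [List.foldl_cons, List.map_cons, List.foldr_cons]
    by_cases hc : row.length > w
    · rw [if_pos hc]
      rw [ih (out.map (fun r => r ++ List.replicate (row.length - w) [])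
              ++ [row ++ List.replicate (row.length - row.length) []]) row.length
            (by
              intro r hr
              rcases List.mem_append.mp hr with hr | hr
              · rcases List.mem_map.mp hr with ⟨r0, hr0, rfl⟩
                have := h r0 hr0; simp; omega
              · simp at hr; subst hr; simp)]
      have hM : max w (max row.length ((xs.map List.length).foldr max 0))
          = max row.length ((xs.map List.length).foldr max 0) := by omega
      rw [hM]
      simp only [Nat.sub_self, List.replicate_zero, List.append_nil, List.map_append,
        List.map_map, List.map_cons, List.map_nil]
      rw [List.append_assoc]
      congr 1
      apply List.map_congr_left
      intro r hr
      simp only [Function.comp]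
      rw [List.append_assoc, List.replicate_append_replicate]
      congr 2
      have := h r hr
      omega
    · rw [if_neg hc]
      rw [ih (out ++ [row ++ List.replicate (w - row.length) []]) w
            (by
              intro r hr
              rcases List.mem_append.mp hr with hr | hr
              · exact h r hr
              · simp at hr; subst hr; simp; omega)]
      have hM : max w (max row.length ((xs.map List.length).foldr max 0))
          = max w ((xs.map List.length).foldr max 0) := by omega
      rw [hM]
      simp only [List.map_append, List.map_cons, List.map_nil]
      rw [List.append_assoc]
      congr 1
      simp only [List.cons_append, List.nil_append]
      congr 1
      rw [List.append_assoc, List.replicate_append_replicate]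
      congr 2
      omega

-- ===== VERDICT (by name: the statement is the Claim_ definition above) =====
theorem straightenArray_spec : Claim_equal_straightenArray := by
  intro name_list _
  show straightenArray name_list = straightenArray_alt name_list
  unfold straightenArray straightenArray_alt
  set L : Nat := (name_list.map List.length).foldr max 0 with hL
  have hlen : name_list.foldl (fun l row => if row.length > l then row.length else l) 0 = L := by
    simpa using pv_len_eq name_list 0
  simp only [hlen]
  have hgrid : name_list.foldl (fun acc _row =>
      acc ++ [(List.range L).foldl (fun temp _ => temp ++ [([] : List Int)]) []]) []
      = List.replicate name_list.length (List.replicate L ([] : List Int)) := by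
    rw [pv_fold_append name_list [] _, pv_fold_append (List.range L) [] ([] : List Int)]
    simp
  rw [hgrid]
  have houter := pv_outer_fold name_list [] (List.replicate L ([] : List Int))
  simp only [List.nil_append, List.length_nil] at houter
  rw [houter]
  simp only [pv_range_map]
  have halt := pv_alt_inv name_list [] 0 (by intro r hr; cases hr)
  rw [halt]
  have hmax : max 0 L = L := Nat.max_eq_right (Nat.zero_le L)
  simp only [List.map_nil, List.nil_append, ← hL, hmax]
  apply List.map_congr_left
  intro row hrow
  rw [pv_write_blank row L (pv_le_max name_list row hrow)]
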